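-- pv_equiv track=rewrite | github.com/nilstate/scafld | scafld/review_packet.py | _render_spec_suggestions
-- ===== SOURCE A (Python) =====
-- def _render_spec_suggestions(suggestions):
--     if not suggestions:
--         return "- None."
--     lines = []
--     for suggestion in suggestions:
--         bits = [suggestion["suggested_text"]]
--         if suggestion.get("kind"):
--             bits.append(f"kind: `{suggestion['kind']}`")
--         if suggestion.get("phase_id"):
--             bits.append(f"phase: `{suggestion['phase_id']}`")
--         if suggestion.get("validation_command"):
--             bits.append(f"validation: `{suggestion['validation_command']}`")
--         if suggestion.get("reason"):
--             bits.append(f"reason: {suggestion['reason']}")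
--         lines.append("- " + " | ".join(bits))
--     return "\n".join(lines)
-- ===== SOURCE B (Python) =====
-- _RANK = {"kind": 0, "phase_id": 1, "validation_command": 2, "reason": 3}
-- _TPLS = ["kind: `{}`", "phase: `{}`", "validation: `{}`", "reason: {}"]
--
-- def _render_spec_suggestions(suggestions):
--     if not suggestions:
--         return "- None."
--     lines = []
--     for s in suggestions:
--         extras = sorted(
--             ((_RANK[k], v) for k, v in s.items() if k in _RANK and v),
--             key=lambda p: p[0],
--         )
--         bits = [s["suggested_text"]] + [_TPLS[r].format(v) for r, v in extras]
--         lines.append("- " + " | ".join(bits))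
--     return "\n".join(lines)
-- ===== Notes on version B (the rewrite author's own statement) =====
-- stated objective: alternative
-- what changed: Instead of probing the four optional keys with fixed-order lookups, B iterates over the suggestion's own items once, collecting rank-tagged rendered fields for recognised keys, then sorts by rank to recover the canonical field order (unique dict keys make the sort deterministic).
-- outside the precondition, e.g. on _render_spec_suggestions([{'kind': 'k'}]): A raises KeyError, B raises KeyError
import Mathlib
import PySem

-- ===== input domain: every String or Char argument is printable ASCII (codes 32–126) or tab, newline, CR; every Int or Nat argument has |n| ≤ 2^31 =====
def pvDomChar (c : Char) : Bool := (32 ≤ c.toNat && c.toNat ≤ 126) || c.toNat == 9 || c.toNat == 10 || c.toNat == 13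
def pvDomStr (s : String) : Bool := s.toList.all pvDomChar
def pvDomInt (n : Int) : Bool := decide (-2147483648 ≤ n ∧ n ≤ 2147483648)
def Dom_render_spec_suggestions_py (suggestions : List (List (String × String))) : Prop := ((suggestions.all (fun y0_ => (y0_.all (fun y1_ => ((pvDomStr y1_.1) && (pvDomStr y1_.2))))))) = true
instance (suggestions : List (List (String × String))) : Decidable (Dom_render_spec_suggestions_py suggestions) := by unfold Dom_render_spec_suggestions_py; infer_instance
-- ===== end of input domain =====

-- B (alternative): one pass over the suggestion's own items collecting rank-tagged rendered
-- fields, then a sort by rank, instead of A's four fixed-order conditional lookups; same value.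

-- ===== PORT A =====
def render_spec_suggestions_py (suggestions : List (List (String × String))) : String :=
  if suggestions = [] then "- None."
  else
    let lines := suggestions.foldl (fun lines suggestion =>
      let d := PySem.Dict.ofList suggestion
      let bits := [d.getD "suggested_text" ""]
      let bits := if d.getD "kind" "" ≠ "" then bits ++ ["kind: `" ++ d.getD "kind" "" ++ "`"] else bits
      let bits := if d.getD "phase_id" "" ≠ "" then bits ++ ["phase: `" ++ d.getD "phase_id" "" ++ "`"] else bits
      let bits := if d.getD "validation_command" "" ≠ "" then bits ++ ["validation: `" ++ d.getD "validation_command" "" ++ "`"] else bits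
      let bits := if d.getD "reason" "" ≠ "" then bits ++ ["reason: " ++ d.getD "reason" ""] else bits
      lines ++ ["- " ++ PySem.Str.join " | " bits]) ([] : List String)
    PySem.Str.join "\n" lines

-- ===== PORT B =====
-- _RANK lookup: 'k in _RANK and _RANK[k]'
def pvRank? (k : String) : Option Int :=
  if k = "kind" then some 0
  else if k = "phase_id" then some 1
  else if k = "validation_command" then some 2
  else if k = "reason" then some 3
  else none

-- _TPLS[r].format(v): indexing the fixed 4-template list by rank
def pvTpl (r : Int) (v : String) : String :=
  if r = 0 then "kind: `" ++ v ++ "`"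
  else if r = 1 then "phase: `" ++ v ++ "`"
  else if r = 2 then "validation: `" ++ v ++ "`"
  else "reason: " ++ v

def render_spec_suggestions_py_alt (suggestions : List (List (String × String))) : String :=
  if suggestions = [] then "- None."
  else
    let lines := suggestions.map (fun s =>
      let d := PySem.Dict.ofList s
      let extras := PySem.List.sorted
        (d.items.filterMap (fun p =>
          match pvRank? p.1 with
          | some r => if p.2 ≠ "" then some (r, p.2) else none
          | none => none))
        (fun p => p.1) false
      let bits := d.getD "suggested_text" "" :: extras.map (fun rv => pvTpl rv.1 rv.2)
      "- " ++ PySem.Str.join " | " bits)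
    PySem.Str.join "\n" lines

-- ===== PRECONDITION & SPEC =====
-- A raises KeyError when a suggestion lacks the "suggested_text" key; such inputs are excluded.
def Pre_render_spec_suggestions_py (suggestions : List (List (String × String))) : Prop :=
  suggestions.all (fun s => s.any (fun p => p.1 == "suggested_text")) = true
instance (suggestions : List (List (String × String))) : Decidable (Pre_render_spec_suggestions_py suggestions) := by unfold Pre_render_spec_suggestions_py; infer_instance
def pvWitness_render_spec_suggestions_py : (List (List (String × String))) :=
  [[("suggested_text", "x"), ("kind", "k")]]

def Spec_render_spec_suggestions_py (suggestions : List (List (String × String))) (out : String) : Prop := out = render_spec_suggestions_py_alt suggestions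
instance (suggestions : List (List (String × String))) (out : String) : Decidable (Spec_render_spec_suggestions_py suggestions out) := by unfold Spec_render_spec_suggestions_py; infer_instance

-- ===== CLAIM (what is proved, stated in full; the proofs are below) =====
def Claim_equal_render_spec_suggestions_py : Prop := ∀ (suggestions : List (List (String × String))), Dom_render_spec_suggestions_py suggestions → Pre_render_spec_suggestions_py suggestions → Spec_render_spec_suggestions_py suggestions (render_spec_suggestions_py suggestions)

-- ===== LEMMAS AND PROOFS =====

-- proof-only helpers: the rank->field selector B filters with
def pvG (p : String × String) : Option (Int × String) :=
  match pvRank? p.1 with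
  | some r => if p.2 ≠ "" then some (r, p.2) else none
  | none => none

def pvE0 (d : PySem.Dict String String) : List (Int × String) :=
  if d.getD "kind" "" ≠ "" then [((0:Int), d.getD "kind" "")] else []
def pvE1 (d : PySem.Dict String String) : List (Int × String) :=
  if d.getD "phase_id" "" ≠ "" then [((1:Int), d.getD "phase_id" "")] else []
def pvE2 (d : PySem.Dict String String) : List (Int × String) :=
  if d.getD "validation_command" "" ≠ "" then [((2:Int), d.getD "validation_command" "")] else []
def pvE3 (d : PySem.Dict String String) : List (Int × String) :=
  if d.getD "reason" "" ≠ "" then [((3:Int), d.getD "reason" "")] else []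

-- the rank-ordered field list determined by the dict's lookups
def pvE (d : PySem.Dict String String) : List (Int × String) :=
  pvE0 d ++ pvE1 d ++ pvE2 d ++ pvE3 d

-- the line A builds for one suggestion (copy of A's loop body)
def pvLineA (suggestion : List (String × String)) : String :=
  let d := PySem.Dict.ofList suggestion
  let bits := [d.getD "suggested_text" ""]
  let bits := if d.getD "kind" "" ≠ "" then bits ++ ["kind: `" ++ d.getD "kind" "" ++ "`"] else bits
  let bits := if d.getD "phase_id" "" ≠ "" then bits ++ ["phase: `" ++ d.getD "phase_id" "" ++ "`"] else bits
  let bits := if d.getD "validation_command" "" ≠ "" then bits ++ ["validation: `" ++ d.getD "validation_command" "" ++ "`"] else bits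
  let bits := if d.getD "reason" "" ≠ "" then bits ++ ["reason: " ++ d.getD "reason" ""] else bits
  "- " ++ PySem.Str.join " | " bits

-- the line B builds for one suggestion (copy of B's map body)
def pvLineB (s : List (String × String)) : String :=
  let d := PySem.Dict.ofList s
  let extras := PySem.List.sorted (d.items.filterMap pvG) (fun p => p.1) false
  "- " ++ PySem.Str.join " | " (d.getD "suggested_text" "" :: extras.map (fun rv => pvTpl rv.1 rv.2))

theorem pvE_perm (L : List (String × String)) (h : (L.map Prod.fst).Nodup) :
    (pvE (PySem.Dict.mk L)).Perm (L.filterMap pvG) := by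
  induction L with
  | nil => decide
  | cons p rest ih =>
    obtain ⟨k, v⟩ := p
    simp only [List.map_cons, List.nodup_cons] at h
    have hrest := ih h.2
    have hget : ∀ x, (PySem.Dict.mk ((k, v) :: rest)).getD x "" =
        if k = x then v else (PySem.Dict.mk rest).getD x "" := by
      intro x
      by_cases hkx : k = x <;>
        simp [PySem.Dict.getD_eq_get?_getD, PySem.Dict.get?_mk_cons, hkx]
    have habs : (PySem.Dict.mk rest).getD k "" = "" := by
      have : (PySem.Dict.mk rest).get? k = none := by
        rw [PySem.Dict.get?_eq_none_iff_not_mem_keys]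
        simpa [PySem.Dict.keys] using h.1
      simp [PySem.Dict.getD_eq_get?_getD, this]
    rw [List.filterMap_cons]
    by_cases h0 : k = "kind"
    · subst h0
      by_cases hv : v = ""
      · subst hv
        have : pvE (PySem.Dict.mk (("kind", "") :: rest)) = pvE (PySem.Dict.mk rest) := by
          simp [pvE, pvE0, pvE1, pvE2, pvE3, hget, habs]
        simpa [pvG, pvRank?, this] using hrest
      · have : pvE (PySem.Dict.mk (("kind", v) :: rest)) =
            ((0:Int), v) :: pvE (PySem.Dict.mk rest) := by
          simp [pvE, pvE0, pvE1, pvE2, pvE3, hget, habs, hv]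
        simpa [pvG, pvRank?, hv, this] using hrest.cons ((0:Int), v)
    · by_cases h1 : k = "phase_id"
      · subst h1
        by_cases hv : v = ""
        · subst hv
          have : pvE (PySem.Dict.mk (("phase_id", "") :: rest)) = pvE (PySem.Dict.mk rest) := by
            simp [pvE, pvE0, pvE1, pvE2, pvE3, hget, habs]
          simpa [pvG, pvRank?, this] using hrest
        · have heq : pvE (PySem.Dict.mk (("phase_id", v) :: rest)) =
              pvE0 (PySem.Dict.mk rest) ++ ((1:Int), v) ::
                (pvE2 (PySem.Dict.mk rest) ++ pvE3 (PySem.Dict.mk rest)) := by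
            simp [pvE, pvE0, pvE1, pvE2, pvE3, hget, hv]
          have hE : pvE (PySem.Dict.mk rest) =
              pvE0 (PySem.Dict.mk rest) ++ (pvE2 (PySem.Dict.mk rest) ++ pvE3 (PySem.Dict.mk rest)) := by
            simp [pvE, pvE1, habs]
          rw [heq]
          refine List.perm_middle.trans ?_
          simpa [pvG, pvRank?, hv, hE] using hrest.cons ((1:Int), v)
      · by_cases h2 : k = "validation_command"
        · subst h2
          by_cases hv : v = ""
          · subst hv
            have : pvE (PySem.Dict.mk (("validation_command", "") :: rest)) = pvE (PySem.Dict.mk rest) := by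
              simp [pvE, pvE0, pvE1, pvE2, pvE3, hget, habs]
            simpa [pvG, pvRank?, this] using hrest
          · have heq : pvE (PySem.Dict.mk (("validation_command", v) :: rest)) =
                (pvE0 (PySem.Dict.mk rest) ++ pvE1 (PySem.Dict.mk rest)) ++ ((2:Int), v) ::
                  pvE3 (PySem.Dict.mk rest) := by
              simp [pvE, pvE0, pvE1, pvE2, pvE3, hget, hv]
            have hE : pvE (PySem.Dict.mk rest) =
                (pvE0 (PySem.Dict.mk rest) ++ pvE1 (PySem.Dict.mk rest)) ++ pvE3 (PySem.Dict.mk rest) := by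
              simp [pvE, pvE2, habs]
            rw [heq]
            refine List.perm_middle.trans ?_
            simpa [pvG, pvRank?, hv, hE] using hrest.cons ((2:Int), v)
        · by_cases h3 : k = "reason"
          · subst h3
            by_cases hv : v = ""
            · subst hv
              have : pvE (PySem.Dict.mk (("reason", "") :: rest)) = pvE (PySem.Dict.mk rest) := by
                simp [pvE, pvE0, pvE1, pvE2, pvE3, hget, habs]
              simpa [pvG, pvRank?, this] using hrest
            · have heq : pvE (PySem.Dict.mk (("reason", v) :: rest)) =
                  (pvE0 (PySem.Dict.mk rest) ++ pvE1 (PySem.Dict.mk rest) ++ pvE2 (PySem.Dict.mk rest)) ++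
                    [((3:Int), v)] := by
                simp [pvE, pvE0, pvE1, pvE2, pvE3, hget, hv]
              have hE : pvE (PySem.Dict.mk rest) =
                  (pvE0 (PySem.Dict.mk rest) ++ pvE1 (PySem.Dict.mk rest) ++ pvE2 (PySem.Dict.mk rest)) ++
                    ([] : List (Int × String)) := by
                simp [pvE, pvE3, habs]
              rw [heq]
              refine (List.perm_middle).trans ?_
              simpa [pvG, pvRank?, hv, hE] using hrest.cons ((3:Int), v)
          · have : pvE (PySem.Dict.mk ((k, v) :: rest)) = pvE (PySem.Dict.mk rest) := by
              simp [pvE, pvE0, pvE1, pvE2, pvE3, hget, h0, h1, h2, h3]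
            simpa [pvG, pvRank?, h0, h1, h2, h3, this] using hrest

theorem pvE_pairwise (d : PySem.Dict String String) :
    (pvE d).Pairwise (fun a b => a.1 < b.1) := by
  unfold pvE pvE0 pvE1 pvE2 pvE3
  split_ifs <;> simp_all [List.pairwise_cons]

theorem pv_sorted_eq (s : List (String × String)) :
    PySem.List.sorted ((PySem.Dict.ofList s).items.filterMap pvG) (fun p => p.1) false
      = pvE (PySem.Dict.ofList s) := by
  apply PySem.List.sorted_eq_of_perm_of_pairwise_lt
  · have hnd : ((PySem.Dict.ofList s).items.map Prod.fst).Nodup := by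
      simpa [PySem.Dict.keys] using PySem.Dict.nodup_keys_ofList (ps := s)
    simpa using pvE_perm (PySem.Dict.ofList s).items hnd
  · exact pvE_pairwise _

theorem pv_line_eq (s : List (String × String)) : pvLineA s = pvLineB s := by
  simp only [pvLineA, pvLineB, pv_sorted_eq, pvE, pvE0, pvE1, pvE2, pvE3]
  split_ifs <;> simp [pvTpl]

theorem pv_fold_eq (ss : List (List (String × String))) (acc : List String) :
    ss.foldl (fun lines s => lines ++ [pvLineA s]) acc = acc ++ ss.map pvLineB := by
  induction ss generalizing acc with
  | nil => simp
  | cons s ss ih => simp [List.foldl_cons, ih, pv_line_eq s]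

-- ===== VERDICT (by name: the statement is the Claim_ definition above) =====
theorem render_spec_suggestions_py_spec : Claim_equal_render_spec_suggestions_py := by
  intro suggestions _ _
  unfold Spec_render_spec_suggestions_py render_spec_suggestions_py render_spec_suggestions_py_alt
  split_ifs with h
  · rfl
  · show PySem.Str.join "\n" (suggestions.foldl (fun lines s => lines ++ [pvLineA s]) []) =
      PySem.Str.join "\n" (suggestions.map pvLineB)
    rw [pv_fold_eq, List.nil_append]
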